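-- pv_equiv track=rewrite | github.com/SSAFYnity/Job-Preparation-Challenge-2nd | Programmers/n^2배열자르기/n^2배열자르기_김수빈.py | solution
-- ===== SOURCE A (Python) =====
-- def solution(n, left, right):
--     arr = []
--     # 시작과 끝 열과 행 설정
--     sr = left // n
--     er = right // n
--     sc = left % n
--     ec = right % n
--     # 규칙에 맞는 행과 열을 삽입하기
--     for r in range(sr, er + 1):
--         c = 0
--         if r == sr:
--             c = sc
--         if r == er:
--             n = ec + 1
--         while c < n:
--             arr.append(max(r, c) + 1)
--             c += 1
--     return arr
-- ===== SOURCE B (Python) =====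
-- def solution(n, left, right):
--     # One flat pass over the linear indices: element at flat index i is max(i//n, i%n) + 1.
--     return [max(divmod(i, n)) + 1 for i in range(left, right + 1)]
-- ===== Notes on version B (the rewrite author's own statement) =====
-- stated objective: simpler
-- what changed: Replaces A's row/column decomposition (outer loop over rows with first/last-row boundary branches, inner while over columns, and in-place mutation of n) by a single flat comprehension over the linear indices i in [left, right] computing max(divmod(i, n)) + 1.
-- outside the precondition, e.g. on solution(-2, 0, 1): A returns [], B returns [1, 0]; on solution(0, 0, 1): A raises ZeroDivisionError, B raises ZeroDivisionError
import Mathlib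
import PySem

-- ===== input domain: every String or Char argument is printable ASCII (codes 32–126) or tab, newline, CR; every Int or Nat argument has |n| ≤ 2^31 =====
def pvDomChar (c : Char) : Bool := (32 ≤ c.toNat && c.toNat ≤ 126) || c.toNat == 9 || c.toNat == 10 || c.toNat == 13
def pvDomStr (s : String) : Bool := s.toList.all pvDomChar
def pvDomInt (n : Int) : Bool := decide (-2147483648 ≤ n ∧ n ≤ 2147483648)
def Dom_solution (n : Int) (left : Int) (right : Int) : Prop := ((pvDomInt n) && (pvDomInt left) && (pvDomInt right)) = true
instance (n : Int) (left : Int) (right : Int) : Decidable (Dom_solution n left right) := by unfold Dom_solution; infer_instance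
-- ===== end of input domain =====

-- B replaces A's row-wise loop with boundary branches by one flat pass over the linear indices (objective: simpler).

-- ===== PORT A =====
-- the 'while c < n: arr.append(max(r, c) + 1); c += 1' loop of A
def solutionWhile (r : Int) (n : Int) (c : Int) (arr : List Int) : List Int :=
  if _h : c < n then solutionWhile r n (c + 1) (arr ++ [max r c + 1]) else arr
termination_by (n - c).toNat
decreasing_by omega

def solution (n : Int) (left : Int) (right : Int) : List Int :=
  let sr := PySem.Int.floordiv left n
  let er := PySem.Int.floordiv right n
  let sc := PySem.Int.mod left n
  let ec := PySem.Int.mod right n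
  -- the for-loop carries the pair (arr, n) since A mutates n on the last row
  ((PySem.List.pyRange sr (er + 1)).foldl
    (fun (st : List Int × Int) r =>
      let c : Int := if r = sr then sc else 0
      let n' : Int := if r = er then ec + 1 else st.2
      (solutionWhile r n' c st.1, n'))
    ([], n)).1

-- ===== PORT B =====
def solution_alt (n : Int) (left : Int) (right : Int) : List Int :=
  (PySem.List.pyRange left (right + 1)).map
    (fun i => max (PySem.Int.floordiv i n) (PySem.Int.mod i n) + 1)

-- ===== PRECONDITION & SPEC =====
-- Pre_ restricts to positive n, the problem's natural domain: n = 0 makes A raise ZeroDivisionError,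
-- and n < 0 (a negative matrix size) is outside the natural domain, where A's mostly-empty answers
-- are an artefact of floor division with a negative divisor.
def Pre_solution (n : Int) (left : Int) (right : Int) : Prop := 0 < n
instance (n : Int) (left : Int) (right : Int) : Decidable (Pre_solution n left right) := by
  unfold Pre_solution; infer_instance

def pvWitness_solution : Int × Int × Int := (3, 2, 5)

def Spec_solution (n : Int) (left : Int) (right : Int) (out : List Int) : Prop :=
  out = solution_alt n left right
instance (n : Int) (left : Int) (right : Int) (out : List Int) : Decidable (Spec_solution n left right out) := by
  unfold Spec_solution; infer_instance

-- ===== CLAIM (what is proved, stated in full; the proofs are below) =====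
def Claim_equal_solution : Prop := ∀ (n : Int) (left : Int) (right : Int), Dom_solution n left right → Pre_solution n left right → Spec_solution n left right (solution n left right)

-- ===== LEMMAS AND PROOFS =====

-- per-row value produced by A's inner while loop, as a map over a column range
lemma solutionWhile_eq (r n : Int) : ∀ c arr,
    solutionWhile r n c arr = arr ++ (PySem.List.pyRange c n).map (fun x => max r x + 1) := by
  intro c arr
  rw [solutionWhile]
  split
  · rename_i h
    rw [solutionWhile_eq r n (c + 1), PySem.List.pyRange_one_cons h]
    simp
  · rename_i h
    have : PySem.List.pyRange c n = [] := by
      unfold PySem.List.pyRange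
      simp; omega
    simp [this]
termination_by c => (n - c).toNat
decreasing_by omega

-- the per-row column list of A, as a function of the row
def rowOf (sr er sc ec n r : Int) : List Int :=
  (PySem.List.pyRange (if r = sr then sc else 0) (if r = er then ec + 1 else n)).map
    (fun x => max r x + 1)

-- A's fold over a row list whose non-final elements differ from er, evaluated to a flatMap
lemma foldA_eq (sr er sc ec : Int) : ∀ (L : List Int) (arr : List Int) (n : Int),
    (∀ x ∈ L.dropLast, x ≠ er) →
    ((L.foldl
      (fun (st : List Int × Int) r =>
        let c : Int := if r = sr then sc else 0
        let n' : Int := if r = er then ec + 1 else st.2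
        (solutionWhile r n' c st.1, n'))
      (arr, n)).1)
    = arr ++ L.flatMap (rowOf sr er sc ec n) := by
  intro L
  induction L with
  | nil => intro arr n _; simp
  | cons r L ih =>
    intro arr n h
    match L, ih with
    | [], _ =>
      simp only [List.foldl_cons, List.foldl_nil, List.flatMap_cons, List.flatMap_nil,
        List.append_nil]
      rw [solutionWhile_eq]
      unfold rowOf
      by_cases hr : r = er <;> simp [hr]
    | (y :: L'), ih =>
      have hr : r ≠ er := by
        apply h; simp [List.dropLast_cons_of_ne_nil]
      rw [List.foldl_cons]
      simp only [if_neg hr]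
      rw [ih _ n (fun x hx => h x (by rw [List.dropLast_cons₂]; exact List.mem_cons_of_mem _ hx))]
      rw [solutionWhile_eq]
      simp [rowOf, hr]

-- shifting an integer range by a constant
lemma pyRange_add_map (d : Int) : ∀ (k : Nat) (a b : Int), (b - a).toNat = k →
    PySem.List.pyRange (a + d) (b + d) = (PySem.List.pyRange a b).map (· + d) := by
  intro k
  induction k with
  | zero =>
    intro a b hk
    have h1 : PySem.List.pyRange a b = [] := by
      unfold PySem.List.pyRange; simp; omega
    have h2 : PySem.List.pyRange (a + d) (b + d) = [] := by
      unfold PySem.List.pyRange; simp; omega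
    simp [h1, h2]
  | succ k ih =>
    intro a b hk
    have hab : a < b := by omega
    rw [PySem.List.pyRange_one_cons hab, PySem.List.pyRange_one_cons (by omega : a + d < b + d)]
    simp only [List.map_cons]
    have := ih (a + 1) b (by omega)
    rw [show a + d + 1 = a + 1 + d by ring, this]

-- B's map over one row's worth of linear indices is that row's list
lemma row_map_eq (n r lo hi : Int) (hn : 0 < n) (hlo : 0 ≤ lo) (hhi : hi ≤ n) :
    (PySem.List.pyRange (r * n + lo) (r * n + hi)).map
      (fun i => max (PySem.Int.floordiv i n) (PySem.Int.mod i n) + 1)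
    = (PySem.List.pyRange lo hi).map (fun x => max r x + 1) := by
  rw [show r * n + lo = lo + r * n by ring, show r * n + hi = hi + r * n by ring,
    pyRange_add_map (r * n) (hi - lo).toNat lo hi rfl, List.map_map]
  apply List.map_congr_left
  intro x hx
  rw [PySem.List.mem_pyRange_one] at hx
  have hd : PySem.Int.floordiv (x + r * n) n = r := by
    rw [PySem.Int.floordiv_eq_iff_of_pos hn]
    constructor <;> nlinarith
  have hm : PySem.Int.mod (x + r * n) n = x := by
    have := PySem.Int.floordiv_mul_add_mod (x + r * n) n
    rw [hd] at this; omega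
  simp [Function.comp, hd, hm]

-- main decomposition: B's flat map splits into A's row-by-row flatMap
lemma main_eq (n : Int) (hn : 0 < n) : ∀ (k : Nat) (left right : Int),
    (PySem.Int.floordiv right n - PySem.Int.floordiv left n).toNat = k →
    solution_alt n left right
    = (PySem.List.pyRange (PySem.Int.floordiv left n) (PySem.Int.floordiv right n + 1)).flatMap
        (rowOf (PySem.Int.floordiv left n) (PySem.Int.floordiv right n)
          (PySem.Int.mod left n) (PySem.Int.mod right n) n) := by
  intro k
  induction k with
  | zero =>
    intro left right hk
    set sr := PySem.Int.floordiv left n with hsr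
    set er := PySem.Int.floordiv right n with her
    set sc := PySem.Int.mod left n with hsc
    set ec := PySem.Int.mod right n with hec
    have hle : er ≤ sr := by omega
    by_cases hse : sr = er
    · -- single row
      have hrows : PySem.List.pyRange sr (er + 1) = [sr] := by
        rw [PySem.List.pyRange_one_cons (by omega : sr < er + 1)]
        have : PySem.List.pyRange (sr + 1) (er + 1) = [] := by
          unfold PySem.List.pyRange; simp; omega
        rw [this]
      rw [hrows]
      simp only [List.flatMap_cons, List.flatMap_nil, List.append_nil]
      unfold rowOf
      simp only [if_pos hse]
      have hl : left = sr * n + sc := by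
        have h0 := PySem.Int.floordiv_mul_add_mod left n
        rw [← hsr, ← hsc] at h0
        omega
      have hr : right + 1 = sr * n + (ec + 1) := by
        have h0 := PySem.Int.floordiv_mul_add_mod right n
        rw [← her, ← hec] at h0
        rw [hse]
        omega
      unfold solution_alt
      rw [hl, hr]
      exact row_map_eq n sr sc (ec + 1) hn (PySem.Int.mod_nonneg left hn)
        (by have := PySem.Int.mod_lt right hn; omega)
    · -- right's row strictly before left's row: both sides empty
      have hlt : er < sr := lt_of_le_of_ne hle (fun h => hse h.symm)
      have hrows : PySem.List.pyRange sr (er + 1) = [] := by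
        unfold PySem.List.pyRange; simp; omega
      have hrl : right + 1 ≤ left := by
        have h1 := PySem.Int.floordiv_mul_add_mod left n
        have h2 := PySem.Int.floordiv_mul_add_mod right n
        have h3 := PySem.Int.mod_nonneg left hn
        have h4 := PySem.Int.mod_lt right hn
        nlinarith
      have hflat : PySem.List.pyRange left (right + 1) = [] := by
        unfold PySem.List.pyRange; simp; omega
      unfold solution_alt
      rw [hrows, hflat]
      simp
  | succ k ih =>
    intro left right hk
    set sr := PySem.Int.floordiv left n with hsr
    set er := PySem.Int.floordiv right n with her
    set sc := PySem.Int.mod left n with hsc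
    set ec := PySem.Int.mod right n with hec
    have hlt : sr < er := by omega
    have hl : left = sr * n + sc := by
      have h0 := PySem.Int.floordiv_mul_add_mod left n
      rw [← hsr, ← hsc] at h0
      omega
    have hsc0 : 0 ≤ sc := PySem.Int.mod_nonneg left hn
    have hscn : sc < n := PySem.Int.mod_lt left hn
    -- split B's range at the start of row sr+1
    set m := (sr + 1) * n with hm
    have hlm : left ≤ m := by nlinarith
    have hmr : m ≤ right + 1 := by
      have h0 := (PySem.Int.le_floordiv_iff_mul_le (a := right) (b := n) (q := sr + 1) hn).mp
        (by rw [← her]; omega)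
      rw [hm]
      omega
    have hdm : PySem.Int.floordiv m n = sr + 1 := by
      rw [PySem.Int.floordiv_eq_iff_of_pos hn]
      constructor <;> nlinarith
    have hmm : PySem.Int.mod m n = 0 := by
      have h0 := PySem.Int.floordiv_mul_add_mod m n
      rw [hdm, hm] at h0
      nlinarith
    unfold solution_alt
    rw [PySem.List.pyRange_one_append left m (right + 1) hlm hmr, List.map_append]
    -- first chunk = row sr
    have hfirst : (PySem.List.pyRange left m).map
        (fun i => max (PySem.Int.floordiv i n) (PySem.Int.mod i n) + 1)
        = rowOf sr er sc ec n sr := by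
      unfold rowOf
      simp only [if_neg (by omega : sr ≠ er)]
      rw [hl, hm, show (sr + 1) * n = sr * n + n by ring]
      exact row_map_eq n sr sc n hn hsc0 le_rfl
    -- second chunk = rows sr+1 .. er, by ih at left' = m
    have hsecond := ih m right (by rw [hdm, ← her]; omega)
    unfold solution_alt at hsecond
    rw [hdm, hmm] at hsecond
    rw [← her, ← hec] at hsecond
    rw [hfirst, hsecond]
    -- peel row sr off the row list
    rw [PySem.List.pyRange_one_cons (by omega : sr < er + 1), List.flatMap_cons]
    congr 1
    apply List.flatMap_congr
    intro r hr
    rw [PySem.List.mem_pyRange_one] at hr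
    obtain ⟨hr1, hr2⟩ := hr
    simp only [rowOf, ite_self, if_neg (show ¬ r = sr by omega)]

-- dropLast of A's row range avoids the last row er
lemma dropLast_rows (sr er : Int) : ∀ x ∈ (PySem.List.pyRange sr (er + 1)).dropLast, x ≠ er := by
  intro x hx
  by_cases h : sr ≤ er
  · rw [PySem.List.pyRange_one_succ_right h, List.dropLast_concat] at hx
    rw [PySem.List.mem_pyRange_one] at hx
    omega
  · have : PySem.List.pyRange sr (er + 1) = [] := by
      unfold PySem.List.pyRange; simp; omega
    rw [this] at hx
    simp at hx

-- ===== VERDICT (by name: the statement is the Claim_ definition above) =====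
theorem solution_spec : Claim_equal_solution := by
  intro n left right _ hn
  unfold Spec_solution solution
  rw [foldA_eq _ _ _ _ _ _ _ (dropLast_rows _ _)]
  rw [main_eq n hn _ left right rfl]
  simp
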